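-- pv_equiv track=rewrite | github.com/chenyaofo/DSM-NAS | codebase/controller/gnn.py | _create_Pindex
-- ===== SOURCE A (Python) =====
-- def _create_Pindex(n_nodes, edge_index):
--     '''
--     -1 represents the edge does not exist.
--     '''
--
--     rev = []
--     _map = {v: i for i, v in enumerate(edge_index)}
--     for i in range(n_nodes):
--         for j in range(n_nodes):
--             if i == j:
--                 continue
--             start = _map.get((i, j), -1)
--             end = _map.get((j, i), -1)
--             if start == -1 and end == -1:
--                 rev.append((-1, -1, -1))
--             else:
--                 rev.append((i, start, end))
--     return rev
-- ===== SOURCE B (Python) =====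
-- def _create_Pindex(n_nodes, edge_index):
--     '''
--     -1 represents the edge does not exist.
--     '''
--     n_pairs = n_nodes * (n_nodes - 1) if n_nodes > 0 else 0
--     rev = [(-1, -1, -1)] * n_pairs
--     for idx, (a, b) in enumerate(edge_index):
--         if a == b or not (0 <= a < n_nodes) or not (0 <= b < n_nodes):
--             continue
--         p = a * (n_nodes - 1) + (b if b < a else b - 1)
--         q = b * (n_nodes - 1) + (a if a < b else a - 1)
--         rev[p] = (a, idx, rev[p][2])
--         rev[q] = (b, rev[q][1], idx)
--     return rev
-- ===== Notes on version B (the rewrite author's own statement) =====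
-- stated objective: alternative
-- what changed: Replaces the dict-of-all-edges plus O(n^2) per-pair gather (two dict lookups per ordered pair) with a pre-filled flat table of n*(n-1) slots and a single scatter pass over the edges using the row-major position formula pos(i,j)=i*(n-1)+(j if j<i else j-1).
import Mathlib
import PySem

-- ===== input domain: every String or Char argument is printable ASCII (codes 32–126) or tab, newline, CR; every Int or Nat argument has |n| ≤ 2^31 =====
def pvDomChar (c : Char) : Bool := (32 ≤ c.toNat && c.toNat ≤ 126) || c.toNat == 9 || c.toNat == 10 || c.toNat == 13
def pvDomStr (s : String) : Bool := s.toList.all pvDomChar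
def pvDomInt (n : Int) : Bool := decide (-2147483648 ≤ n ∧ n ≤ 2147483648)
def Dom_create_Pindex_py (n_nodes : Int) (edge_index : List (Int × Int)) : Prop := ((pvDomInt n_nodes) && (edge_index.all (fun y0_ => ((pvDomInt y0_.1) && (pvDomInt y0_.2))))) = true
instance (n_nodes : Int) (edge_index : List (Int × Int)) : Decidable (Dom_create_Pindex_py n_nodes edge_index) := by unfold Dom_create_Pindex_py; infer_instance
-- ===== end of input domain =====

-- B replaces A's dict-of-edges + per-pair double-loop gather by a pre-filled flat table
-- scattered into by a single pass over the edges (alternative decomposition, same cost class).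

-- ===== PORT A =====
def create_Pindex_py (n_nodes : Int) (edge_index : List (Int × Int)) : List (Int × Int × Int) :=
  let _map : PySem.Dict (Int × Int) Int :=
    (PySem.List.enumerate edge_index).foldl (fun d p => d.insert p.2 p.1) PySem.Dict.empty
  (PySem.List.pyRange 0 n_nodes 1).foldl (fun rev i =>
    (PySem.List.pyRange 0 n_nodes 1).foldl (fun rev j =>
      if i = j then rev
      else
        let start := _map.getD (i, j) (-1)
        let stop := _map.getD (j, i) (-1)
        if start = -1 ∧ stop = -1 then rev ++ [(-1, -1, -1)]
        else rev ++ [(i, start, stop)]) rev) []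

-- ===== PORT B =====
def create_Pindex_py_alt (n_nodes : Int) (edge_index : List (Int × Int)) : List (Int × Int × Int) :=
  let nPairs : Int := if n_nodes > 0 then n_nodes * (n_nodes - 1) else 0
  let rev0 := PySem.List.pyRepeat [((-1 : Int), (-1 : Int), (-1 : Int))] nPairs
  (PySem.List.enumerate edge_index).foldl (fun rev p =>
    let idx := p.1
    let a := p.2.1
    let b := p.2.2
    if a = b ∨ ¬ (0 ≤ a ∧ a < n_nodes) ∨ ¬ (0 ≤ b ∧ b < n_nodes) then rev
    else
      let pp := a * (n_nodes - 1) + (if b < a then b else b - 1)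
      let qq := b * (n_nodes - 1) + (if a < b then a else a - 1)
      let rev1 := rev.set pp.toNat (a, idx, (PySem.List.pyGetD rev pp (-1, -1, -1)).2.2)
      rev1.set qq.toNat (b, (PySem.List.pyGetD rev1 qq (-1, -1, -1)).2.1, idx)) rev0



-- ===== LEMMAS AND PROOFS =====

-- the dict A builds: edge ↦ index of its last occurrence

-- ===== PRECONDITION & SPEC =====
def Spec_create_Pindex_py (n_nodes : Int) (edge_index : List (Int × Int)) (out : List (Int × Int × Int)) : Prop := out = create_Pindex_py_alt n_nodes edge_index
instance (n_nodes : Int) (edge_index : List (Int × Int)) (out : List (Int × Int × Int)) : Decidable (Spec_create_Pindex_py n_nodes edge_index out) := by unfold Spec_create_Pindex_py; infer_instance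

-- ===== CLAIM (what is proved, stated in full; the proofs are below) =====
def Claim_equal_create_Pindex_py : Prop := ∀ (n_nodes : Int) (edge_index : List (Int × Int)), Dom_create_Pindex_py n_nodes edge_index → Spec_create_Pindex_py n_nodes edge_index (create_Pindex_py n_nodes edge_index)

-- ===== LEMMAS AND PROOFS =====

def pvCd (i : Int) (t : Nat) : Int := if (t : Int) < i then (t : Int) else (t : Int) + 1

theorem pvRow (n i : Int) (h0 : 0 ≤ i) (h1 : i < n) :
    (PySem.List.pyRange 0 n 1).filter (fun j => decide ¬(i = j)) =
      (List.range (n.toNat - 1)).map (pvCd i) := by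
  have hsplit : PySem.List.pyRange 0 n 1 =
      PySem.List.pyRange 0 i 1 ++ PySem.List.pyRange i (i+1) 1 ++ PySem.List.pyRange (i+1) n 1 := by
    rw [← PySem.List.pyRange_one_append 0 i (i+1) h0 (by omega),
        ← PySem.List.pyRange_one_append 0 (i+1) n (by omega) (by omega)]
  rw [hsplit, List.filter_append, List.filter_append]
  rw [PySem.List.pyRange_one_singleton]
  have hmid : List.filter (fun j => decide ¬(i = j)) [i] = [] := by simp
  have hpre : List.filter (fun j => decide ¬(i = j)) (PySem.List.pyRange 0 i 1) = PySem.List.pyRange 0 i 1 := by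
    apply List.filter_eq_self.mpr
    intro x hx
    rw [PySem.List.mem_pyRange_one] at hx
    simp; omega
  have hsuf : List.filter (fun j => decide ¬(i = j)) (PySem.List.pyRange (i+1) n 1) = PySem.List.pyRange (i+1) n 1 := by
    apply List.filter_eq_self.mpr
    intro x hx
    rw [PySem.List.mem_pyRange_one] at hx
    simp; omega
  rw [hmid, hpre, hsuf, List.append_nil]
  have hlen : n.toNat - 1 = i.toNat + (n - (i+1)).toNat := by omega
  rw [hlen, List.range_add, List.map_append, List.map_map]
  congr 1
  · rw [PySem.List.pyRange_one]
    have : (i - 0).toNat = i.toNat := by omega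
    rw [this]
    apply List.map_congr_left
    intro t ht
    rw [List.mem_range] at ht
    simp only [pvCd]
    rw [if_pos (by omega)]
    omega
  · rw [PySem.List.pyRange_one]
    apply List.map_congr_left
    intro t ht
    rw [List.mem_range] at ht
    simp only [Function.comp, pvCd]
    rw [if_neg (by push_cast; omega)]
    push_cast; omega

theorem pvFlat (c L : Nat) (g : Int → Nat → (Int × Int × Int)) :
    (PySem.List.pyRange 0 c 1).flatMap (fun i => (List.range L).map (g i)) =
      (List.range (c * L)).map (fun k => g ((k / L : Nat) : Int) (k % L)) := by
  induction c with
  | zero => simp [PySem.List.pyRange_one_eq_nil]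
  | succ c ih =>
    rcases Nat.eq_zero_or_pos L with hL | hL
    · subst hL; simp
    · have hc : ((c+1 : Nat) : Int) = (c : Int) + 1 := by push_cast; ring
      rw [hc, PySem.List.pyRange_one_succ_right (by positivity), List.flatMap_append, ih]
      have hm : (c+1) * L = c * L + L := by ring
      rw [hm, List.range_add, List.map_append, List.map_map]
      congr 1
      simp only [List.flatMap_cons, List.flatMap_nil, List.append_nil]
      apply List.map_congr_left
      intro t ht
      rw [List.mem_range] at ht
      have h1 : (c * L + t) / L = c := by
        rw [mul_comm, Nat.mul_add_div hL, Nat.div_eq_of_lt ht, Nat.add_zero]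
      have h2 : (c * L + t) % L = t := by
        rw [mul_comm, Nat.mul_add_mod, Nat.mod_eq_of_lt ht]
      simp [Function.comp, h1, h2]

def pvAmap (edge_index : List (Int × Int)) : PySem.Dict (Int × Int) Int :=
  (PySem.List.enumerate edge_index).foldl (fun d p => d.insert p.2 p.1) PySem.Dict.empty

-- one output entry for the ordered pair (i, j), as a function of the dict
def pvEnt (m : PySem.Dict (Int × Int) Int) (i j : Int) : Int × Int × Int :=
  if m.getD (i, j) (-1) = -1 ∧ m.getD (j, i) (-1) = -1 then (-1, -1, -1)
  else (i, m.getD (i, j) (-1), m.getD (j, i) (-1))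

-- decoding a flat table index k into the pair (row, col)
def pvDI (n : Int) (k : Nat) : Int := ((k / (n.toNat - 1) : Nat) : Int)
def pvJ0 (n : Int) (k : Nat) : Nat := k % (n.toNat - 1)
def pvDJ (n : Int) (k : Nat) : Int :=
  if ((pvJ0 n k : Nat) : Int) < pvDI n k then (pvJ0 n k : Int) else (pvJ0 n k : Int) + 1

-- normal form: the whole table as a map over flat indices
def pvTbl (n : Int) (m : PySem.Dict (Int × Int) Int) : List (Int × Int × Int) :=
  (List.range (n.toNat * (n.toNat - 1))).map (fun k => pvEnt m (pvDI n k) (pvDJ n k))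

theorem pvA_eq_tbl (n : Int) (ei : List (Int × Int)) :
    create_Pindex_py n ei = pvTbl n (pvAmap ei) := by
  have hmap : (PySem.List.enumerate ei).foldl (fun d p => d.insert p.2 p.1) PySem.Dict.empty = pvAmap ei := rfl
  set m := pvAmap ei with hm
  show (PySem.List.pyRange 0 n 1).foldl (fun rev i =>
    (PySem.List.pyRange 0 n 1).foldl (fun rev j =>
      if i = j then rev
      else
        if m.getD (i, j) (-1) = -1 ∧ m.getD (j, i) (-1) = -1 then rev ++ [(-1, -1, -1)]
        else rev ++ [(i, m.getD (i, j) (-1), m.getD (j, i) (-1))]) rev) [] = pvTbl n m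
  rcases Int.lt_or_le n 0 with hn | hn
  · rw [PySem.List.pyRange_one_eq_nil (by omega)]
    simp [pvTbl]
    omega
  -- inner loop
  have inner : ∀ i, 0 ≤ i → i < n → ∀ acc : List (Int × Int × Int),
      (PySem.List.pyRange 0 n 1).foldl (fun rev j =>
        if i = j then rev
        else
          if m.getD (i, j) (-1) = -1 ∧ m.getD (j, i) (-1) = -1 then rev ++ [(-1, -1, -1)]
          else rev ++ [(i, m.getD (i, j) (-1), m.getD (j, i) (-1))]) acc
      = acc ++ (List.range (n.toNat - 1)).map (fun t => pvEnt m i (pvCd i t)) := by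
    intro i h0 h1 acc
    have hb : ∀ acc (j : Int), j ∈ PySem.List.pyRange 0 n 1 →
        (if i = j then acc
         else
          if m.getD (i, j) (-1) = -1 ∧ m.getD (j, i) (-1) = -1 then acc ++ [(-1, -1, -1)]
          else acc ++ [(i, m.getD (i, j) (-1), m.getD (j, i) (-1))])
        = (if ¬ (i = j) then acc ++ [pvEnt m i j] else acc) := by
      intro acc j _
      by_cases h : i = j
      · simp [h]
      · simp only [if_neg h, if_pos h, pvEnt]
        split_ifs <;> rfl
    rw [PySem.List.foldl_congr_mem _ _ (fun acc j => if ¬ (i = j) then acc ++ [pvEnt m i j] else acc) _ hb]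
    rw [PySem.List.foldl_append_ite (p := fun j => ¬ (i = j)) (f := pvEnt m i)]
    rw [pvRow n i h0 h1, List.map_map]
    rfl
  have houter : ∀ acc (i : Int), i ∈ PySem.List.pyRange 0 n 1 →
      (PySem.List.pyRange 0 n 1).foldl (fun rev j =>
        if i = j then rev
        else
          if m.getD (i, j) (-1) = -1 ∧ m.getD (j, i) (-1) = -1 then rev ++ [(-1, -1, -1)]
          else rev ++ [(i, m.getD (i, j) (-1), m.getD (j, i) (-1))]) acc
      = acc ++ (List.range (n.toNat - 1)).map (fun t => pvEnt m i (pvCd i t)) := by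
    intro acc i hi
    rw [PySem.List.mem_pyRange_one] at hi
    exact inner i hi.1 hi.2 acc
  rw [PySem.List.foldl_congr_mem _ _ (fun acc i => acc ++ (List.range (n.toNat - 1)).map (fun t => pvEnt m i (pvCd i t))) _ houter,
      PySem.List.foldl_append_eq_flatMap, List.nil_append]
  have hnn : n = ((n.toNat : Nat) : Int) := by omega
  rw [hnn]; simp only [Int.toNat_natCast]
  rw [pvFlat n.toNat (n.toNat - 1) (fun i t => pvEnt m i (pvCd i t))]
  rfl

theorem pvEnt_22 (m : PySem.Dict (Int × Int) Int) (i j : Int) :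
    (pvEnt m i j).2.2 = m.getD (j, i) (-1) := by
  unfold pvEnt; split_ifs with h
  · exact h.2.symm
  · rfl

theorem pvEnt_21 (m : PySem.Dict (Int × Int) Int) (i j : Int) :
    (pvEnt m i j).2.1 = m.getD (i, j) (-1) := by
  unfold pvEnt; split_ifs with h
  · exact h.1.symm
  · rfl

theorem pvEnt_insert_ne (m : PySem.Dict (Int × Int) Int) (i j a b v : Int)
    (h1 : (i, j) ≠ (a, b)) (h2 : (j, i) ≠ (a, b)) :
    pvEnt (m.insert (a, b) v) i j = pvEnt m i j := by
  unfold pvEnt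
  rw [PySem.Dict.getD_insert_of_ne _ _ _ h1, PySem.Dict.getD_insert_of_ne _ _ _ h2]

theorem pvNt2 (n : Int) (k : Nat) (hk : k < n.toNat * (n.toNat - 1)) : 2 ≤ n.toNat := by
  have hpos : 0 < n.toNat * (n.toNat - 1) := Nat.lt_of_le_of_lt (Nat.zero_le _) hk
  rcases Nat.eq_zero_or_pos (n.toNat - 1) with h | h
  · rw [h, Nat.mul_zero] at hpos; omega
  · omega

theorem pvDec_bounds (n : Int) (k : Nat) (hk : k < n.toNat * (n.toNat - 1)) :
    0 ≤ pvDI n k ∧ pvDI n k < n ∧ 0 ≤ pvDJ n k ∧ pvDJ n k < n ∧ pvDI n k ≠ pvDJ n k := by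
  have h2 := pvNt2 n k hk
  have hL : 0 < n.toNat - 1 := by omega
  have hdiv : k / (n.toNat - 1) < n.toNat := (Nat.div_lt_iff_lt_mul hL).mpr hk
  have hmod : k % (n.toNat - 1) < n.toNat - 1 := Nat.mod_lt _ hL
  have hn : n = ((n.toNat : Nat) : Int) := by omega
  simp only [pvDJ, pvDI, pvJ0]
  split_ifs with h <;> refine ⟨?_, ?_, ?_, ?_, ?_⟩ <;> try omega
  exact Int.natCast_nonneg _

theorem pvPos_spec (n a b : Int) (ha : 0 ≤ a) (ha2 : a < n) (hb : 0 ≤ b) (hb2 : b < n)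
    (hab : a ≠ b) :
    0 ≤ a * (n - 1) + (if b < a then b else b - 1) ∧
    (a * (n - 1) + (if b < a then b else b - 1)).toNat < n.toNat * (n.toNat - 1) ∧
    pvDI n (a * (n - 1) + (if b < a then b else b - 1)).toNat = a ∧
    pvDJ n (a * (n - 1) + (if b < a then b else b - 1)).toNat = b := by
  set off := if b < a then b else b - 1 with hoffdef
  have hoff : 0 ≤ off ∧ off < n - 1 := by rw [hoffdef]; split_ifs <;> omega
  have hA : ((a.toNat : Nat) : Int) = a := Int.toNat_of_nonneg ha
  have hL' : ((n.toNat - 1 : Nat) : Int) = n - 1 := by omega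
  have hO : ((off.toNat : Nat) : Int) = off := Int.toNat_of_nonneg hoff.1
  have hnonneg : 0 ≤ a * (n - 1) + off := by
    have : 0 ≤ a * (n - 1) := mul_nonneg ha (by omega)
    omega
  have hcast : a * (n - 1) + off = ((a.toNat * (n.toNat - 1) + off.toNat : Nat) : Int) := by
    conv_lhs => rw [← hA, ← hL', ← hO]
    push_cast; ring
  have hppN : (a * (n - 1) + off).toNat = a.toNat * (n.toNat - 1) + off.toNat := by
    rw [hcast, Int.toNat_natCast]
  have hOL : off.toNat < n.toNat - 1 := by omega
  have hAn : a.toNat + 1 ≤ n.toNat := by omega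
  have hlt : a.toNat * (n.toNat - 1) + off.toNat < n.toNat * (n.toNat - 1) := by
    calc a.toNat * (n.toNat - 1) + off.toNat < a.toNat * (n.toNat - 1) + (n.toNat - 1) :=
          Nat.add_lt_add_left hOL _
      _ = (a.toNat + 1) * (n.toNat - 1) := by ring
      _ ≤ n.toNat * (n.toNat - 1) := Nat.mul_le_mul_right _ hAn
  have hL : 0 < n.toNat - 1 := by omega
  have hdiv : (a.toNat * (n.toNat - 1) + off.toNat) / (n.toNat - 1) = a.toNat := by
    rw [mul_comm, Nat.mul_add_div hL, Nat.div_eq_of_lt hOL, Nat.add_zero]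
  have hmod : (a.toNat * (n.toNat - 1) + off.toNat) % (n.toNat - 1) = off.toNat := by
    rw [mul_comm, Nat.mul_add_mod, Nat.mod_eq_of_lt hOL]
  refine ⟨hnonneg, ?_, ?_, ?_⟩
  · rw [hppN]; exact hlt
  · unfold pvDI; rw [hppN, hdiv]; exact hA
  · unfold pvDJ pvJ0 pvDI
    rw [hppN, hdiv, hmod, hA, hO]
    rw [hoffdef]
    split_ifs <;> omega

theorem pvDec_pos (n : Int) (k : Nat) (hk : k < n.toNat * (n.toNat - 1)) :
    (pvDI n k * (n - 1) + (if pvDJ n k < pvDI n k then pvDJ n k else pvDJ n k - 1)).toNat = k := by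
  have h2 := pvNt2 n k hk
  have hL : 0 < n.toNat - 1 := by omega
  have hL' : ((n.toNat - 1 : Nat) : Int) = n - 1 := by omega
  have hmod : k % (n.toNat - 1) < n.toNat - 1 := Nat.mod_lt _ hL
  have hrec : (n.toNat - 1) * (k / (n.toNat - 1)) + k % (n.toNat - 1) = k := Nat.div_add_mod k _
  have hval : (pvDI n k * (n - 1) + (if pvDJ n k < pvDI n k then pvDJ n k else pvDJ n k - 1))
      = (((n.toNat - 1) * (k / (n.toNat - 1)) + k % (n.toNat - 1) : Nat) : Int) := by
    have hLrw : (n - 1 : Int) = ((n.toNat - 1 : Nat) : Int) := by omega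
    unfold pvDJ pvDI pvJ0
    rw [hLrw]
    split_ifs <;> (push_cast; ring_nf; try omega)
  rw [hval, Int.toNat_natCast, hrec]

theorem pvTbl_getD (n : Int) (m : PySem.Dict (Int × Int) Int) (k : Nat)
    (hk : k < n.toNat * (n.toNat - 1)) :
    (pvTbl n m).getD k (-1, -1, -1) = pvEnt m (pvDI n k) (pvDJ n k) := by
  have hlen : (pvTbl n m).length = n.toNat * (n.toNat - 1) := by simp [pvTbl]
  rw [List.getD_eq_getElem _ _ (by omega)]
  simp [pvTbl]

theorem pvStep (n : Int) (m : PySem.Dict (Int × Int) Int) (v a b : Int) (hv : 0 ≤ v) :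
    (fun (rev : List (Int × Int × Int)) (p : Int × Int × Int) =>
      let idx := p.1
      let a := p.2.1
      let b := p.2.2
      if a = b ∨ ¬ (0 ≤ a ∧ a < n) ∨ ¬ (0 ≤ b ∧ b < n) then rev
      else
        let pp := a * (n - 1) + (if b < a then b else b - 1)
        let qq := b * (n - 1) + (if a < b then a else a - 1)
        let rev1 := rev.set pp.toNat (a, idx, (PySem.List.pyGetD rev pp (-1, -1, -1)).2.2)
        rev1.set qq.toNat (b, (PySem.List.pyGetD rev1 qq (-1, -1, -1)).2.1, idx))
      (pvTbl n m) (v, a, b)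
    = pvTbl n (m.insert (a, b) v) := by
  dsimp only
  by_cases hg : a = b ∨ ¬ (0 ≤ a ∧ a < n) ∨ ¬ (0 ≤ b ∧ b < n)
  · rw [if_pos hg]
    refine Eq.symm ?_
    unfold pvTbl
    apply List.map_congr_left
    intro k hk
    rw [List.mem_range] at hk
    obtain ⟨hi0, hi1, hj0, hj1, hij⟩ := pvDec_bounds n k hk
    apply pvEnt_insert_ne
    · intro heq
      rw [Prod.mk.injEq] at heq
      rcases hg with h | h | h
      · exact hij (by rw [heq.1, heq.2, h])
      · exact h ⟨heq.1 ▸ hi0, heq.1 ▸ hi1⟩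
      · exact h ⟨heq.2 ▸ hj0, heq.2 ▸ hj1⟩
    · intro heq
      rw [Prod.mk.injEq] at heq
      rcases hg with h | h | h
      · exact hij (by rw [heq.1, heq.2, h])
      · exact h ⟨heq.1 ▸ hj0, heq.1 ▸ hj1⟩
      · exact h ⟨heq.2 ▸ hi0, heq.2 ▸ hi1⟩
  · rw [if_neg hg]
    push Not at hg
    obtain ⟨hab, ⟨ha0, ha1⟩, hb0, hb1⟩ := hg
    obtain ⟨hpp0, hppL, hppI, hppJ⟩ := pvPos_spec n a b ha0 ha1 hb0 hb1 hab
    obtain ⟨hqq0, hqqL, hqqI, hqqJ⟩ := pvPos_spec n b a hb0 hb1 ha0 ha1 (Ne.symm hab)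
    have hlen : (pvTbl n m).length = n.toNat * (n.toNat - 1) := by simp [pvTbl]
    set ppN := (a * (n - 1) + (if b < a then b else b - 1)).toNat with hppN
    set qqN := (b * (n - 1) + (if a < b then a else a - 1)).toNat with hqqN
    have hne : ppN ≠ qqN := by
      intro h
      apply hab
      rw [← hppI, h, hqqI]
    have e0get : (PySem.List.pyGetD (pvTbl n m) (a * (n - 1) + (if b < a then b else b - 1)) (-1, -1, -1)).2.2
        = m.getD (b, a) (-1) := by
      rw [PySem.List.pyGetD_of_nonneg _ _ hpp0, ← hppN, pvTbl_getD n m ppN hppL, hppI, hppJ,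
          pvEnt_22]
    rw [e0get]
    have hlen1 : ((pvTbl n m).set ppN (a, v, m.getD (b, a) (-1))).length = n.toNat * (n.toNat - 1) := by
      rw [List.length_set, hlen]
    have e1get : (PySem.List.pyGetD ((pvTbl n m).set ppN (a, v, m.getD (b, a) (-1)))
        (b * (n - 1) + (if a < b then a else a - 1)) (-1, -1, -1)).2.1 = m.getD (b, a) (-1) := by
      rw [PySem.List.pyGetD_of_nonneg _ _ hqq0, ← hqqN]
      rw [List.getD_eq_getElem _ _ (by omega)]
      rw [List.getElem_set, if_neg hne]
      have : (pvTbl n m)[qqN] = ((pvTbl n m).getD qqN (-1, -1, -1)) := by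
        rw [List.getD_eq_getElem _ _ (by omega)]
      rw [this, pvTbl_getD n m qqN hqqL, hqqI, hqqJ, pvEnt_21]
    rw [e1get]
    apply List.ext_getElem
    · simp [pvTbl]
    · intro k h1 h2
      have hkN : k < n.toNat * (n.toNat - 1) := by
        rw [List.length_set, List.length_set, hlen] at h1; exact h1
      rw [List.getElem_set, List.getElem_set]
      have hrhs : (pvTbl n (m.insert (a, b) v))[k] = pvEnt (m.insert (a, b) v) (pvDI n k) (pvDJ n k) := by
        simp [pvTbl]
      rw [hrhs]
      have hba_ne : ((b, a) : Int × Int) ≠ (a, b) := by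
        intro h; rw [Prod.mk.injEq] at h; exact hab h.2
      by_cases hqk : qqN = k
      · rw [if_pos hqk, ← hqk, hqqI, hqqJ]
        unfold pvEnt
        rw [PySem.Dict.getD_insert_of_ne _ _ _ hba_ne, PySem.Dict.getD_insert_self]
        rw [if_neg (by intro h; omega)]
      · rw [if_neg hqk]
        by_cases hpk : ppN = k
        · rw [if_pos hpk, ← hpk, hppI, hppJ]
          unfold pvEnt
          rw [PySem.Dict.getD_insert_of_ne _ _ _ hba_ne, PySem.Dict.getD_insert_self]
          rw [if_neg (by intro h; omega)]
        · rw [if_neg hpk]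
          have hlhs : (pvTbl n m)[k] = pvEnt m (pvDI n k) (pvDJ n k) := by simp [pvTbl]
          rw [hlhs]
          refine Eq.symm (pvEnt_insert_ne m _ _ _ _ _ ?_ ?_)
          · intro heq
            rw [Prod.mk.injEq] at heq
            apply hpk
            have := pvDec_pos n k hkN
            rw [heq.1, heq.2] at this
            rw [hppN, this]
          · intro heq
            rw [Prod.mk.injEq] at heq
            apply hqk
            have := pvDec_pos n k hkN
            rw [heq.1, heq.2] at this
            rw [hqqN, this]

theorem pvAmap_append (ei : List (Int × Int)) (e : Int × Int) :
    pvAmap (ei ++ [e]) = (pvAmap ei).insert e (ei.length : Int) := by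
  unfold pvAmap
  rw [PySem.List.enumerate_append, List.foldl_append]
  simp [PySem.List.enumerate]

theorem pvB_eq_tbl (n : Int) (ei : List (Int × Int)) :
    create_Pindex_py_alt n ei = pvTbl n (pvAmap ei) := by
  induction ei using List.reverseRecOn with
  | nil =>
    show PySem.List.pyRepeat [((-1 : Int), (-1 : Int), (-1 : Int))]
        (if n > 0 then n * (n - 1) else 0) = pvTbl n (pvAmap [])
    rw [PySem.List.pyRepeat_singleton]
    have hN : (if n > 0 then n * (n - 1) else 0).toNat = n.toNat * (n.toNat - 1) := by
      split_ifs with h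
      · have hn : ((n.toNat : Nat) : Int) = n := by omega
        have h1 : ((n.toNat - 1 : Nat) : Int) = n - 1 := by omega
        have h2 : ((n.toNat * (n.toNat - 1) : Nat) : Int) = n * (n - 1) := by
          rw [Int.natCast_mul, hn, h1]
        rw [← h2, Int.toNat_natCast]
      · have : n.toNat = 0 := by omega
        rw [this]; rfl
    rw [hN]
    unfold pvTbl pvAmap
    simp [pvEnt, PySem.Dict.getD_empty, PySem.List.enumerate, List.map_const']
  | append_singleton ei e ih =>
    show (PySem.List.enumerate (ei ++ [e])).foldl _ _ = _
    rw [PySem.List.enumerate_append]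
    rw [List.foldl_append]
    have hbase : (PySem.List.enumerate ei).foldl _ _ = pvTbl n (pvAmap ei) := ih
    rw [hbase]
    show (fun (rev : List (Int × Int × Int)) (p : Int × Int × Int) =>
      let idx := p.1
      let a := p.2.1
      let b := p.2.2
      if a = b ∨ ¬ (0 ≤ a ∧ a < n) ∨ ¬ (0 ≤ b ∧ b < n) then rev
      else
        let pp := a * (n - 1) + (if b < a then b else b - 1)
        let qq := b * (n - 1) + (if a < b then a else a - 1)
        let rev1 := rev.set pp.toNat (a, idx, (PySem.List.pyGetD rev pp (-1, -1, -1)).2.2)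
        rev1.set qq.toNat (b, (PySem.List.pyGetD rev1 qq (-1, -1, -1)).2.1, idx))
      (pvTbl n (pvAmap ei)) ((0 : Int) + (ei.length : Int), e)
      = pvTbl n (pvAmap (ei ++ [e]))
    rw [pvAmap_append]
    have he : ((0 : Int) + (ei.length : Int), e) = ((ei.length : Int), e.1, e.2) := by
      rw [zero_add]
    rw [he]
    have := pvStep n (pvAmap ei) (ei.length : Int) e.1 e.2 (by positivity)
    rw [this]

-- ===== VERDICT (by name: the statement is the Claim_ definition above) =====
theorem create_Pindex_py_spec : Claim_equal_create_Pindex_py := by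
  intro n ei _
  unfold Spec_create_Pindex_py
  rw [pvA_eq_tbl, pvB_eq_tbl]
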